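-- pv_equiv track=rewrite | github.com/rahul38888/coding_practice | src/practices/practice/chocolate_station/script.py | chocolate_station
-- ===== SOURCE A (Python) =====
-- def chocolate_station(n, a, p):
--     balance = 0
--     bought = 0
--     for i in range(len(a)):
--         val = 0
--         if i is 0:
--             val = -a[i]
--         else:
--             val = a[i-1] - a[i]
--
--         if val > 0:
--             balance += val
--         elif balance >= -val:
--             balance += val
--         else:
--             bought += -val - balance
--             balance = 0
--
--     return p*bought
-- ===== SOURCE B (Python) =====
-- def chocolate_station(n, a, p):
--     m = 0
--     for x in a:
--         if x > m:
--             m = x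
--     return p * m
-- ===== Notes on version B (the rewrite author's own statement) =====
-- stated objective: simpler
-- what changed: Replaces the balance/bought deficit simulation over consecutive-station differences with a single running maximum floored at 0 (the loop telescopes: bought = max(0, max(a))), returning p times that maximum.
import Mathlib
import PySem

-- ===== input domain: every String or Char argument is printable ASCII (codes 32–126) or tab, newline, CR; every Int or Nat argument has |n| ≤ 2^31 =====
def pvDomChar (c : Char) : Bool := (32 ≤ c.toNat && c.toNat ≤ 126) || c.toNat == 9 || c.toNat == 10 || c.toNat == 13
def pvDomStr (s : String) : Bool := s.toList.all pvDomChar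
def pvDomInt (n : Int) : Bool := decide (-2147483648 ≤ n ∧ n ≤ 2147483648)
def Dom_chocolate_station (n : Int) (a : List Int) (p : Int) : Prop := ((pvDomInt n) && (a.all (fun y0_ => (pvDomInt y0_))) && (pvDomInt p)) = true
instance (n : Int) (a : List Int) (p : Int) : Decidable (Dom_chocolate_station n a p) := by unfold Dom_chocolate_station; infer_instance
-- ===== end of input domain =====

-- ===== PORT A =====
-- literal port of A: loop over range(len(a)) with state (balance, bought);
-- 'i is 0' behaves as i == 0 for these small ints in CPython.
def chocolate_station (n : Int) (a : List Int) (p : Int) : Int :=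
  let s :=
    (PySem.List.pyRange 0 (a.length : Int) 1).foldl
      (fun (st : Int × Int) (i : Int) =>
        let val : Int :=
          if i == 0 then -(PySem.List.pyGetD a i 0)
          else PySem.List.pyGetD a (i - 1) 0 - PySem.List.pyGetD a i 0
        if 0 < val then (st.1 + val, st.2)
        else if -val ≤ st.1 then (st.1 + val, st.2)
        else (0, st.2 + (-val - st.1)))
      (0, 0)
  p * s.2

-- ===== PORT B =====
def chocolate_station_alt (n : Int) (a : List Int) (p : Int) : Int :=
  p * a.foldl (fun m x => if m < x then x else m) 0

-- ===== PRECONDITION & SPEC =====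
def Spec_chocolate_station (n : Int) (a : List Int) (p : Int) (out : Int) : Prop := out = chocolate_station_alt n a p
instance (n : Int) (a : List Int) (p : Int) (out : Int) : Decidable (Spec_chocolate_station n a p out) := by unfold Spec_chocolate_station; infer_instance

-- ===== CLAIM (what is proved, stated in full; the proofs are below) =====
def Claim_equal_chocolate_station : Prop := ∀ (n : Int) (a : List Int) (p : Int), Dom_chocolate_station n a p → Spec_chocolate_station n a p (chocolate_station n a p)

-- ===== LEMMAS AND PROOFS =====

-- B's update function is max
lemma bmax_eq_max (m x : Int) : (if m < x then x else m) = max m x := by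
  split_ifs with h <;> omega

lemma foldl_bmax_eq_max (l : List Int) (m : Int) :
    l.foldl (fun m x => if m < x then x else m) m = l.foldl max m := by
  induction l generalizing m with
  | nil => rfl
  | cons y t ih => simp [List.foldl, bmax_eq_max]

-- loop invariant: after processing indices 0..k-1, bought is the running max
-- (floored at 0) of the first k elements, and balance = bought - a[k-1].
lemma loop_inv (a : List Int) (k : Nat) (hk : k ≤ a.length) :
    (PySem.List.pyRange 0 (k : Int) 1).foldl
      (fun (st : Int × Int) (i : Int) =>
        let val : Int :=
          if i == 0 then -(PySem.List.pyGetD a i 0)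
          else PySem.List.pyGetD a (i - 1) 0 - PySem.List.pyGetD a i 0
        if 0 < val then (st.1 + val, st.2)
        else if -val ≤ st.1 then (st.1 + val, st.2)
        else (0, st.2 + (-val - st.1)))
      (0, 0)
    = ((a.take k).foldl max 0 - (if k = 0 then 0 else a.getD (k - 1) 0),
       (a.take k).foldl max 0) := by
  induction k with
  | zero => simp
  | succ k ih =>
      have hk' : k ≤ a.length := Nat.le_of_succ_le hk
      have hklt : k < a.length := hk
      have hsplit : PySem.List.pyRange 0 ((k + 1 : Nat) : Int) 1
          = PySem.List.pyRange 0 (k : Int) 1 ++ [(k : Int)] := by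
        have := PySem.List.pyRange_one_succ_right (a := 0) (b := (k : Int)) (by positivity)
        push_cast
        rw [this]
      rw [hsplit, List.foldl_append, ih hk']
      have htake : a.take (k + 1) = a.take k ++ [a.getD k 0] := by
        rw [List.take_add_one, List.getD_eq_getElem a 0 hklt]
        simp [List.getElem?_eq_getElem hklt]
      have hMtake : (a.take (k + 1)).foldl max 0
          = max ((a.take k).foldl max 0) (a.getD k 0) := by
        rw [htake, List.foldl_append]; simp
      cases k with
      | zero =>
          simp only [List.foldl_cons, List.foldl_nil, List.take_zero,
            Nat.cast_zero, beq_self_eq_true, if_true, PySem.List.pyGetD_zero]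
          rw [hMtake]
          simp only [List.take_zero, List.foldl_nil, Nat.succ_ne_zero, if_false,
            Nat.sub_self]
          norm_num
          split_ifs <;> simp only [Prod.mk.injEq] <;> constructor <;> omega
      | succ j =>
          have hne : ((j + 1 : Nat) : Int) ≠ 0 := by positivity
          have hjlt : j < a.length := by omega
          have hmem : a.getD j 0 ∈ a.take (j + 1) := by
            rw [List.getD_eq_getElem a 0 hjlt]
            exact List.mem_take_iff_getElem.mpr ⟨j, by omega, rfl⟩
          have hM := (PySem.List.le_foldl_max (a.take (j + 1)) 0).2 (a.getD j 0) hmem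
          have hM0 : 0 ≤ (a.take (j + 1)).foldl max 0 :=
            (PySem.List.le_foldl_max (a.take (j + 1)) 0).1
          set M := (a.take (j + 1)).foldl max 0 with hMdef
          clear_value M
          simp only [List.foldl_cons, List.foldl_nil]
          simp only [beq_iff_eq, hne, if_false]
          have hidx : ((j + 1 : Nat) : Int) - 1 = (j : Nat) := by push_cast; ring
          rw [hidx, hMtake]
          simp only [PySem.List.pyGetD_natCast, Nat.succ_ne_zero, if_false,
            Nat.add_sub_cancel]
          set x := a.getD j 0 with hx
          set y := a.getD (j + 1) 0 with hy
          clear_value x y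
          split_ifs <;> simp only [Prod.mk.injEq] <;> constructor <;> omega

-- ===== VERDICT (by name: the statement is the Claim_ definition above) =====
theorem chocolate_station_spec : Claim_equal_chocolate_station := by
  intro n a p _
  unfold Spec_chocolate_station chocolate_station chocolate_station_alt
  have h := loop_inv a a.length le_rfl
  rw [h]
  simp [foldl_bmax_eq_max]
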